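-- pv_equiv track=rewrite | github.com/Tarlanc/Side_Projects | scrape_insta.py | bereinigen
-- ===== SOURCE A (Python) =====
-- def bereinigen(text):
--     text = text.replace('\n','  ')
--     outtext = ''
--     for c in text:
--         if c.upper() == c.lower():
--             outtext += ' '
--         else:
--             outtext += c.lower()
--
--     while '  ' in outtext:
--         outtext = outtext.replace('  ', ' ')
--     return outtext
-- ===== SOURCE B (Python) =====
-- def bereinigen(text):
--     out = []
--     prev_space = False
--     for c in text:
--         if c.isalpha():
--             out.append(c.lower())
--             prev_space = False
--         elif not prev_space:
--             out.append(' ')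
--             prev_space = True
--     return ''.join(out)
-- ===== Notes on version B (the rewrite author's own statement) =====
-- stated objective: faster
-- what changed: A builds the output by per-character string concatenation and then collapses runs of spaces by re-running a whole-string replace until fixpoint; B does one linear pass with a previous-was-space flag, emitting at most one space per run of non-letters (measured ~1.5x at the largest size).
import Mathlib
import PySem

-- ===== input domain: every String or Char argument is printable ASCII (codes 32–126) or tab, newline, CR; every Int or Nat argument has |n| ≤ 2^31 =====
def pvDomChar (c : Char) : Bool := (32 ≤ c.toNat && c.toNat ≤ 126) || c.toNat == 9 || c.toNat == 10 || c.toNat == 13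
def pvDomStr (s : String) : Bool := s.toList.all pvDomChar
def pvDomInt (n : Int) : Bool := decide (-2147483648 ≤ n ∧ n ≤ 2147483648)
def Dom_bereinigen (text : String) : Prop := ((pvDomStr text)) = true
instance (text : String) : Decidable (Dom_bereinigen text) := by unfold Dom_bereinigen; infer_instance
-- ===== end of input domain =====

-- B replaces A's char-by-char string concatenation plus a repeated full-string
-- replace-until-fixpoint collapse loop by a single pass with a previous-was-space flag (objective: faster).


-- ===== PORT A =====
-- helper facts needed only for the TERMINATION of the while loop of A
-- (replace "  "→" " strictly shortens a string containing "  ").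
/-- One replace pass of A's collapse loop (halves each run of spaces), structurally. -/
def repDD : List Char → List Char
  | [] => []
  | [c] => [c]
  | a :: b :: t => if a = ' ' ∧ b = ' ' then ' ' :: repDD t else a :: repDD (b :: t)

theorem goDD_eq (fuel : Nat) : ∀ (l acc : List Char), l.length ≤ fuel →
    PySem.Chars.replace.go [' ', ' '] [' '] fuel l acc = acc.reverse ++ repDD l := by
  induction fuel with
  | zero =>
    intro l acc h
    have : l = [] := List.length_eq_zero_iff.mp (Nat.le_zero.mp h)
    subst this; simp [PySem.Chars.replace.go, repDD]
  | succ n ih =>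
    intro l acc h
    match l with
    | [] => simp [PySem.Chars.replace.go, repDD]
    | [c] =>
      simp only [PySem.Chars.replace.go, List.isPrefixOf, Bool.and_eq_true]
      rw [if_neg (by simp), ih [] (c :: acc) (by simp)]
      simp [repDD]
    | a :: b :: t =>
      simp only [PySem.Chars.replace.go]
      by_cases hab : a = ' ' ∧ b = ' '
      · obtain ⟨ha, hb⟩ := hab
        subst ha; subst hb
        rw [if_pos (by simp [List.isPrefixOf])]
        rw [show List.drop [' ', ' '].length (' ' :: ' ' :: t) = t from rfl,
            show ([' '] : List Char).reverse ++ acc = ' ' :: acc from rfl]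
        rw [ih t (' ' :: acc) (by simp at h ⊢; omega)]
        simp [repDD]
      · rw [if_neg (by simp [List.isPrefixOf]; intro h1 h2; exact hab ⟨h1.symm, h2.symm⟩)]
        rw [ih (b :: t) (a :: acc) (by simp at h ⊢; omega)]
        have : repDD (a :: b :: t) = a :: repDD (b :: t) := by
          rw [repDD, if_neg hab]
        rw [this]; simp

theorem replaceDD_eq (m : List Char) : PySem.Chars.replace m [' ', ' '] [' '] = repDD m := by
  rw [PySem.Chars.replace]
  simp only [List.isEmpty_cons, if_false, Bool.false_eq_true]
  simpa using goDD_eq m.length m [] (le_refl _)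

/-- Structural "contains two adjacent spaces". -/
def hasDD : List Char → Bool
  | a :: b :: t => (a == ' ' && b == ' ') || hasDD (b :: t)
  | _ => false

theorem hasDD_iff_infix : ∀ m : List Char, hasDD m = true ↔ [' ', ' '] <:+: m := by
  intro m
  match m with
  | [] => simp [hasDD]
  | [c] =>
    simp only [hasDD, Bool.false_eq_true, false_iff]
    intro h
    have := h.length_le
    simp at this
  | a :: b :: t =>
    rw [hasDD]
    rw [List.infix_cons_iff]
    constructor
    · intro h
      rcases Bool.or_eq_true_iff.mp h with h | h
      · simp only [Bool.and_eq_true, beq_iff_eq] at h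
        exact Or.inl (by simp [h.1, h.2, List.cons_prefix_cons])
      · exact Or.inr ((hasDD_iff_infix (b :: t)).mp h)
    · intro h
      rcases h with h | h
      · simp only [List.cons_prefix_cons] at h
        obtain ⟨ha, hb, -⟩ := h
        simp [← ha, ← hb]
      · exact Bool.or_eq_true_iff.mpr (Or.inr ((hasDD_iff_infix (b :: t)).mpr h))

theorem repDD_length_le : ∀ m : List Char, (repDD m).length ≤ m.length := by
  intro m
  match m with
  | [] => simp [repDD]
  | [c] => simp [repDD]
  | a :: b :: t =>
    rw [repDD]
    split
    · have := repDD_length_le t; simp; omega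
    · have := repDD_length_le (b :: t); simp at this ⊢; omega

theorem repDD_length_lt : ∀ m : List Char, hasDD m = true → (repDD m).length < m.length := by
  intro m
  match m with
  | [] => simp [hasDD]
  | [c] => simp [hasDD]
  | a :: b :: t =>
    intro h
    rw [repDD]
    split
    · have := repDD_length_le t; simp; omega
    · rename_i hab
      have h' : hasDD (b :: t) = true := by
        rw [hasDD] at h
        rcases Bool.or_eq_true_iff.mp h with h | h
        · simp only [Bool.and_eq_true, beq_iff_eq] at h; exact absurd ⟨h.1, h.2⟩ hab
        · exact h
      have := repDD_length_lt (b :: t) h'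
      simp at this ⊢; omega

theorem collapse_step_lt (m : List Char) (h : PySem.Chars.isIn [' ', ' '] m = true) :
    (PySem.Chars.replace m [' ', ' '] [' ']).length < m.length := by
  rw [replaceDD_eq]
  exact repDD_length_lt m ((hasDD_iff_infix m).mpr ((PySem.Chars.isIn_iff_infix _ _).mp h))

/-- A's collapse while-loop (replace to fixpoint), on char lists. -/
def whileCollapse (out : List Char) : List Char :=
  if h : PySem.Chars.isIn [' ', ' '] out = true then
    whileCollapse (PySem.Chars.replace out [' ', ' '] [' '])
  else out
termination_by out.length
decreasing_by exact collapse_step_lt out h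

def bereinigen (text : String) : String :=
  let text2 := PySem.Str.replace text "\n" "  "
  let outtext := text2.toList.foldl
    (fun out c =>
      if PySem.Chars.upperChar c == PySem.Chars.lowerChar c then out ++ [' ']
      else out ++ [PySem.Chars.lowerChar c]) ([] : List Char)
  String.ofList (whileCollapse outtext)

-- ===== PORT B =====
def bereinigen_alt (text : String) : String :=
  let r := text.toList.foldl
    (fun (st : List Char × Bool) c =>
      if PySem.Chars.isalpha c then (st.1 ++ [PySem.Chars.lowerChar c], false)
      else if st.2 then st
      else (st.1 ++ [' '], true)) (([] : List Char), false)
  String.ofList r.1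

-- ===== PRECONDITION & SPEC =====
def Spec_bereinigen (text : String) (out : String) : Prop := out = bereinigen_alt text
instance (text : String) (out : String) : Decidable (Spec_bereinigen text out) := by unfold Spec_bereinigen; infer_instance

-- ===== CLAIM (what is proved, stated in full; the proofs are below) =====
def Claim_equal_bereinigen : Prop := ∀ (text : String), Dom_bereinigen text → Spec_bereinigen text (bereinigen text)

-- ===== LEMMAS AND PROOFS =====

/-- A's first replace step (each newline becomes two spaces), structurally. -/
def expandNL : List Char → List Char
  | [] => []
  | c :: t => if c = '\n' then ' ' :: ' ' :: expandNL t else c :: expandNL t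

theorem goNL_eq (fuel : Nat) : ∀ (l acc : List Char), l.length ≤ fuel →
    PySem.Chars.replace.go ['\n'] [' ', ' '] fuel l acc = acc.reverse ++ expandNL l := by
  induction fuel with
  | zero =>
    intro l acc h
    have : l = [] := List.length_eq_zero_iff.mp (Nat.le_zero.mp h)
    subst this; simp [PySem.Chars.replace.go, expandNL]
  | succ n ih =>
    intro l acc h
    match l with
    | [] => simp [PySem.Chars.replace.go, expandNL]
    | c :: t =>
      simp only [PySem.Chars.replace.go]
      by_cases hc : c = '\n'
      · subst hc
        rw [if_pos (by simp [List.isPrefixOf])]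
        rw [show List.drop ['\n'].length ('\n' :: t) = t from rfl,
            show ([' ', ' '] : List Char).reverse ++ acc = ' ' :: ' ' :: acc from rfl]
        rw [ih t (' ' :: ' ' :: acc) (by simp at h ⊢; omega)]
        simp [expandNL]
      · rw [if_neg (by simp [List.isPrefixOf]; intro h1; exact hc h1.symm)]
        rw [ih t (c :: acc) (by simp at h ⊢; omega)]
        simp [expandNL, hc]

theorem replaceNL_eq (m : List Char) : PySem.Chars.replace m ['\n'] [' ', ' '] = expandNL m := by
  rw [PySem.Chars.replace]
  simp only [List.isEmpty_cons, if_false, Bool.false_eq_true]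
  simpa using goNL_eq m.length m [] (le_refl _)

/-- A's per-character mapping. -/
def fA (c : Char) : Char :=
  if PySem.Chars.upperChar c == PySem.Chars.lowerChar c then ' ' else PySem.Chars.lowerChar c

theorem toNat_ofNat_lt (n : Nat) (h1 : n < 55296) : (Char.ofNat n).toNat = n := by
  unfold Char.ofNat
  split
  · rfl
  · rename_i h; simp [Nat.isValidChar] at h; omega

theorem isupper_bounds {c : Char} (h : PySem.Chars.isupper c = true) :
    65 ≤ c.toNat ∧ c.toNat ≤ 90 := by
  simp only [PySem.Chars.isupper, Bool.and_eq_true, decide_eq_true_eq] at h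
  exact ⟨h.1, h.2⟩

theorem islower_bounds {c : Char} (h : PySem.Chars.islower c = true) :
    97 ≤ c.toNat ∧ c.toNat ≤ 122 := by
  simp only [PySem.Chars.islower, Bool.and_eq_true, decide_eq_true_eq] at h
  exact ⟨h.1, h.2⟩

theorem fA_eq (c : Char) :
    fA c = if PySem.Chars.isalpha c then PySem.Chars.lowerChar c else ' ' := by
  rw [fA, PySem.Chars.isalpha]
  by_cases hu : PySem.Chars.isupper c = true
  · have hb := isupper_bounds hu
    have hl : PySem.Chars.islower c = false := by
      rw [PySem.Chars.islower]
      simp only [Bool.and_eq_false_iff]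
      left; simp only [decide_eq_false_iff_not]
      show ¬ ('a'.toNat ≤ c.toNat); simp; omega
    rw [PySem.Chars.upperChar, PySem.Chars.lowerChar, hl, hu]
    simp only [if_pos, if_false, Bool.false_eq_true]
    have hne : (c == Char.ofNat (c.toNat + 32)) = false := by
      rw [beq_eq_false_iff_ne]
      intro he
      have : c.toNat = (Char.ofNat (c.toNat + 32)).toNat := by rw [← he]
      rw [toNat_ofNat_lt _ (by omega)] at this; omega
    rw [hne]
    simp
  · by_cases hl : PySem.Chars.islower c = true
    · have hb := islower_bounds hl
      have hu' : PySem.Chars.isupper c = false := by simpa using hu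
      rw [PySem.Chars.upperChar, PySem.Chars.lowerChar, hl, hu']
      simp only [if_true, Bool.false_eq_true, if_false]
      have hne : (Char.ofNat (c.toNat - 32) == c) = false := by
        rw [beq_eq_false_iff_ne]
        intro he
        have : (Char.ofNat (c.toNat - 32)).toNat = c.toNat := by rw [he]
        rw [toNat_ofNat_lt _ (by omega)] at this; omega
      rw [hne]
      simp
    · have hu' : PySem.Chars.isupper c = false := by simpa using hu
      have hl' : PySem.Chars.islower c = false := by simpa using hl
      rw [PySem.Chars.upperChar, PySem.Chars.lowerChar, hu', hl']
      simp

theorem lowerChar_ne_space {c : Char} (h : PySem.Chars.isalpha c = true) :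
    PySem.Chars.lowerChar c ≠ ' ' := by
  rw [PySem.Chars.lowerChar]
  rcases Bool.or_eq_true_iff.mp (by rwa [PySem.Chars.isalpha] at h) with hu | hl
  · have hb := isupper_bounds hu
    rw [hu]
    simp only [if_true]
    intro he
    have : (Char.ofNat (c.toNat + 32)).toNat = (' ' : Char).toNat := by rw [he]
    rw [toNat_ofNat_lt _ (by omega)] at this
    simp at this; omega
  · have hb := islower_bounds hl
    have hu : PySem.Chars.isupper c = false := by
      rw [PySem.Chars.isupper]
      simp only [Bool.and_eq_false_iff]
      right; simp only [decide_eq_false_iff_not]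
      show ¬ (c.toNat ≤ 'Z'.toNat); simp; omega
    rw [hu]
    simp only [Bool.false_eq_true, if_false]
    intro he
    have : c.toNat = (' ' : Char).toNat := by rw [he]
    simp at this; omega

/-- One-pass space collapsing on an already-mapped list. -/
def onep : Bool → List Char → List Char
  | _, [] => []
  | p, c :: t =>
    if c = ' ' then (if p then onep true t else ' ' :: onep true t)
    else c :: onep false t

/-- One-pass normalisation on the raw list (B's loop body, functionally). -/
def canon : Bool → List Char → List Char
  | _, [] => []
  | p, c :: t =>
    if PySem.Chars.isalpha c then PySem.Chars.lowerChar c :: canon false t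
    else if p then canon true t
    else ' ' :: canon true t

theorem canon_eq_onep : ∀ (l : List Char) (p : Bool), canon p l = onep p (l.map fA) := by
  intro l
  induction l with
  | nil => intro p; simp [canon, onep]
  | cons c t ih =>
    intro p
    rw [canon, List.map_cons, onep, fA_eq]
    by_cases hc : PySem.Chars.isalpha c = true
    · rw [if_pos hc, if_pos hc, if_neg (lowerChar_ne_space hc), ih]
    · rw [if_neg hc, if_neg hc, if_pos rfl]
      cases p with
      | true => simp [ih]
      | false => simp [ih]

theorem fA_newline : fA '\n' = ' ' := by decide
theorem fA_space : fA ' ' = ' ' := by decide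

theorem onep_expand : ∀ (l : List Char) (p : Bool),
    onep p ((expandNL l).map fA) = onep p (l.map fA) := by
  intro l
  induction l with
  | nil => intro p; simp [expandNL]
  | cons c t ih =>
    intro p
    by_cases hc : c = '\n'
    · subst hc
      rw [expandNL, if_pos rfl]
      simp only [List.map_cons, fA_space, fA_newline]
      rw [onep, if_pos rfl]
      cases p with
      | true =>
        simp only [if_true]
        rw [onep, if_pos rfl]
        simp only [if_true]
        rw [onep, if_pos rfl]
        simp [ih]
      | false =>
        simp only [Bool.false_eq_true, if_false]
        rw [onep, if_pos rfl]
        simp only [if_true]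
        rw [onep, if_pos rfl]
        simp [ih]
    · rw [expandNL, if_neg hc]
      simp only [List.map_cons]
      rw [onep, onep]
      by_cases hs : fA c = ' '
      · rw [if_pos hs, if_pos hs]
        cases p <;> simp [ih]
      · rw [if_neg hs, if_neg hs, ih]

theorem onep_repDD : ∀ (m : List Char) (p : Bool), onep p (repDD m) = onep p m := by
  intro m
  match m with
  | [] => intro p; simp [repDD]
  | [c] => intro p; simp [repDD]
  | a :: b :: t =>
    intro p
    rw [repDD]
    split
    · rename_i hab
      obtain ⟨ha, hb⟩ := hab
      subst ha; subst hb
      rw [onep, if_pos rfl, onep, if_pos rfl]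
      cases p with
      | true =>
        simp only [if_true]
        rw [onep_repDD t, onep, if_pos rfl]
        simp
      | false =>
        simp only [Bool.false_eq_true, if_false]
        rw [onep_repDD t, onep, if_pos rfl]
        simp
    · rw [onep, onep]
      by_cases hs : a = ' '
      · rw [if_pos hs, if_pos hs]
        cases p <;> simp [onep_repDD (b :: t)]
      · rw [if_neg hs, if_neg hs, onep_repDD (b :: t)]

theorem onep_id : ∀ (m : List Char) (p : Bool), hasDD m = false →
    (p = true → m.head? ≠ some ' ') → onep p m = m := by
  intro m
  induction m with
  | nil => intro p _ _; simp [onep]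
  | cons c t ih =>
    intro p hdd hp
    rw [onep]
    by_cases hs : c = ' '
    · subst hs
      have hpf : p = false := by
        cases p with
        | false => rfl
        | true => exact absurd rfl (hp rfl)
      subst hpf
      rw [if_pos rfl, if_neg (by simp)]
      congr 1
      apply ih true
      · match t with
        | [] => simp [hasDD]
        | b :: t' =>
          rw [hasDD] at hdd
          exact (Bool.or_eq_false_iff.mp hdd).2
      · intro _ hh
        match t, hh with
        | b :: t', hh =>
          rw [hasDD] at hdd
          have := (Bool.or_eq_false_iff.mp hdd).1
          simp at this hh
          exact this (by rw [hh])
    · rw [if_neg hs]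
      congr 1
      apply ih false
      · match t with
        | [] => simp [hasDD]
        | b :: t' =>
          rw [hasDD] at hdd
          exact (Bool.or_eq_false_iff.mp hdd).2
      · simp
  
theorem whileCollapse_eq_onep (m : List Char) : whileCollapse m = onep false m := by
  rw [whileCollapse]
  split
  · rename_i h
    have hlt := collapse_step_lt m h
    rw [whileCollapse_eq_onep (PySem.Chars.replace m [' ', ' '] [' '])]
    rw [replaceDD_eq, onep_repDD]
  · rename_i h
    have hdd : hasDD m = false := by
      rw [Bool.eq_false_iff]
      intro hc
      exact h ((PySem.Chars.isIn_iff_infix _ _).mpr ((hasDD_iff_infix m).mp hc))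
    exact (onep_id m false hdd (by simp)).symm
termination_by m.length
decreasing_by exact hlt

theorem foldA_eq : ∀ (l acc : List Char),
    l.foldl (fun out c =>
      if PySem.Chars.upperChar c == PySem.Chars.lowerChar c then out ++ [' ']
      else out ++ [PySem.Chars.lowerChar c]) acc = acc ++ l.map fA := by
  intro l
  induction l with
  | nil => intro acc; simp
  | cons c t ih =>
    intro acc
    rw [List.foldl_cons, List.map_cons]
    have hstep : (if PySem.Chars.upperChar c == PySem.Chars.lowerChar c then acc ++ [' ']
        else acc ++ [PySem.Chars.lowerChar c]) = acc ++ [fA c] := by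
      rw [fA]; split <;> rfl
    rw [hstep, ih]
    simp

theorem foldB_eq : ∀ (l : List Char) (acc : List Char) (p : Bool),
    (l.foldl (fun (st : List Char × Bool) c =>
      if PySem.Chars.isalpha c then (st.1 ++ [PySem.Chars.lowerChar c], false)
      else if st.2 then st
      else (st.1 ++ [' '], true)) (acc, p)).1 = acc ++ canon p l := by
  intro l
  induction l with
  | nil => intro acc p; simp [canon]
  | cons c t ih =>
    intro acc p
    rw [List.foldl_cons, canon]
    by_cases hc : PySem.Chars.isalpha c = true
    · rw [if_pos hc, if_pos hc, ih]
      simp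
    · rw [if_neg hc, if_neg hc]
      cases p with
      | true => simp only [if_true]; rw [ih]
      | false =>
        simp only [Bool.false_eq_true, if_false]
        rw [ih]
        simp

theorem newline_toList : ("\n" : String).toList = ['\n'] := by decide
theorem twospace_toList : ("  " : String).toList = [' ', ' '] := by decide

theorem bereinigen_eq_alt (text : String) : bereinigen text = bereinigen_alt text := by
  rw [bereinigen, bereinigen_alt]
  have h2 : (PySem.Str.replace text "\n" "  ").toList = expandNL text.toList := by
    rw [PySem.Str.replace, String.toList_ofList, newline_toList, twospace_toList,
        replaceNL_eq]
  rw [h2, foldA_eq, foldB_eq]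
  simp only [List.nil_append]
  rw [whileCollapse_eq_onep, onep_expand, ← canon_eq_onep]

-- ===== VERDICT (by name: the statement is the Claim_ definition above) =====
theorem bereinigen_spec : Claim_equal_bereinigen := by
  intro text _
  exact bereinigen_eq_alt text
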